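-- pv_equiv track=rewrite | github.com/popyson1648/leetcode | scripts/solved.py | strip_blocks
-- ===== SOURCE A (Python) =====
-- from typing import List
--
-- def strip_blocks(lines: List[str]) -> List[str]:
--     out: List[str] = []
--     state = "prefix"       # prefix / skip / code / after
--     for ln in lines:
--         if state == "prefix":
--             if "/*" in ln:
--                 state = "skip"
--                 continue
--             out.append(ln)
--         elif state == "skip":
--             if "// @lc code=start" in ln or "// @lc code-start" in ln:
--                 state = "code"
--             continue
--         elif state == "code":
--             if "// @lc code=end" in ln or "// @lc code-end" in ln:
--                 state = "after"
--                 continue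
--             out.append(ln)
--         else:  # after
--             out.append(ln)
--
--     compact: List[str] = []
--     prev_blank = False
--     for ln in out:
--         blank = ln.strip() == ""
--         if blank and prev_blank:
--             continue
--         compact.append(ln)
--         prev_blank = blank
--     return compact
-- ===== SOURCE B (Python) =====
-- from typing import List
--
-- def strip_blocks(lines: List[str]) -> List[str]:
--     compact: List[str] = []
--     prev_blank = False
--
--     def emit(ln: str) -> None:
--         nonlocal prev_blank
--         blank = ln.strip() == ""
--         if blank and prev_blank:
--             return
--         compact.append(ln)
--         prev_blank = blank
--
--     state = "prefix"
--     for ln in lines: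
--         if state == "prefix":
--             if "/*" in ln:
--                 state = "skip"
--                 continue
--             emit(ln)
--         elif state == "skip":
--             if "// @lc code=start" in ln or "// @lc code-start" in ln:
--                 state = "code"
--             continue
--         elif state == "code":
--             if "// @lc code=end" in ln or "// @lc code-end" in ln:
--                 state = "after"
--                 continue
--             emit(ln)
--         else:  # after
--             emit(ln)
--     return compact
-- ===== Notes on version B (the rewrite author's own statement) =====
-- stated objective: alternative
-- what changed: The two sequential passes (state-machine filter producing an intermediate list, then a blank-line-collapsing pass over it) are fused into one loop that threads the state and prev_blank together and emits through a single emit helper, so no intermediate list is built.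
import Mathlib
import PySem

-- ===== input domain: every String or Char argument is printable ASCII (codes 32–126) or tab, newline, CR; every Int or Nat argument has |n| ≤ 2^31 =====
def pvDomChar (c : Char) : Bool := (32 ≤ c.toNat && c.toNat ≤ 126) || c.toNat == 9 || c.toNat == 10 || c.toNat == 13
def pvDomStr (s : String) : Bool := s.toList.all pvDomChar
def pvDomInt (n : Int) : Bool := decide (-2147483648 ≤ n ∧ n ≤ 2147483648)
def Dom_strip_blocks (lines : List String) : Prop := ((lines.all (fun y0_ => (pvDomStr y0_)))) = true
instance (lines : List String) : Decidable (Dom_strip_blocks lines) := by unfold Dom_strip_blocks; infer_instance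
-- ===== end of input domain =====

-- B fuses A's two passes (state-machine filter, then blank-line collapse) into one loop
-- threading state and prev_blank together through a single emit helper; objective: alternative.

-- ===== PORT A =====
-- first loop of A: the state machine over lines, emitting kept lines in order
def aLoop1 (lines : List String) (state : String) : List String :=
  match lines with
  | [] => []
  | ln :: rest =>
    if state = "prefix" then
      if PySem.Str.isIn "/*" ln then aLoop1 rest "skip"
      else ln :: aLoop1 rest "prefix"
    else if state = "skip" then
      if PySem.Str.isIn "// @lc code=start" ln || PySem.Str.isIn "// @lc code-start" ln then
        aLoop1 rest "code"
      else aLoop1 rest "skip"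
    else if state = "code" then
      if PySem.Str.isIn "// @lc code=end" ln || PySem.Str.isIn "// @lc code-end" ln then
        aLoop1 rest "after"
      else ln :: aLoop1 rest "code"
    else  -- after
      ln :: aLoop1 rest state

-- second loop of A: collapse consecutive blank lines
def aLoop2 (out : List String) (prev_blank : Bool) : List String :=
  match out with
  | [] => []
  | ln :: rest =>
    let blank := PySem.Str.strip ln == ""
    if blank && prev_blank then aLoop2 rest prev_blank
    else ln :: aLoop2 rest blank

def strip_blocks (lines : List String) : List String :=
  aLoop2 (aLoop1 lines "prefix") false

-- ===== PORT B =====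
-- B's emit: skip a blank line after a blank line, else keep it and continue with the new prev_blank
def bEmit (ln : String) (prev_blank : Bool) (k : Bool → List String) : List String :=
  let blank := PySem.Str.strip ln == ""
  if blank && prev_blank then k prev_blank
  else ln :: k blank

-- B's single fused loop: state machine and blank-collapse state threaded together
def bLoop (lines : List String) (state : String) (prev_blank : Bool) : List String :=
  match lines with
  | [] => []
  | ln :: rest =>
    if state = "prefix" then
      if PySem.Str.isIn "/*" ln then bLoop rest "skip" prev_blank
      else bEmit ln prev_blank (fun pb => bLoop rest "prefix" pb)
    else if state = "skip" then
      if PySem.Str.isIn "// @lc code=start" ln || PySem.Str.isIn "// @lc code-start" ln then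
        bLoop rest "code" prev_blank
      else bLoop rest "skip" prev_blank
    else if state = "code" then
      if PySem.Str.isIn "// @lc code=end" ln || PySem.Str.isIn "// @lc code-end" ln then
        bLoop rest "after" prev_blank
      else bEmit ln prev_blank (fun pb => bLoop rest "code" pb)
    else  -- after
      bEmit ln prev_blank (fun pb => bLoop rest state pb)

def strip_blocks_alt (lines : List String) : List String :=
  bLoop lines "prefix" false

-- ===== PRECONDITION & SPEC =====
def Spec_strip_blocks (lines : List String) (out : List String) : Prop := out = strip_blocks_alt lines
instance (lines : List String) (out : List String) : Decidable (Spec_strip_blocks lines out) := by unfold Spec_strip_blocks; infer_instance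

-- ===== CLAIM (what is proved, stated in full; the proofs are below) =====
def Claim_equal_strip_blocks : Prop := ∀ (lines : List String), Dom_strip_blocks lines → Spec_strip_blocks lines (strip_blocks lines)

-- ===== LEMMAS AND PROOFS =====
theorem bEmit_aLoop2 (ln : String) (prev : Bool) (t : List String) :
    bEmit ln prev (fun pb => aLoop2 t pb) = aLoop2 (ln :: t) prev := rfl

theorem bLoop_eq (lines : List String) : ∀ (state : String) (prev : Bool),
    bLoop lines state prev = aLoop2 (aLoop1 lines state) prev := by
  induction lines with
  | nil => intro state prev; simp [bLoop, aLoop1, aLoop2]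
  | cons ln rest ih =>
    intro state prev
    simp only [bLoop, aLoop1]
    split_ifs <;>
      first
        | exact ih _ _
        | exact (congrArg (bEmit ln prev) (funext fun pb => ih _ pb)).trans
            (bEmit_aLoop2 ln prev _)

-- ===== VERDICT (by name: the statement is the Claim_ definition above) =====
theorem strip_blocks_spec : Claim_equal_strip_blocks := by
  intro lines _
  unfold Spec_strip_blocks strip_blocks strip_blocks_alt
  exact (bLoop_eq lines "prefix" false).symm
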